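-- pv_equiv track=rewrite | github.com/bunkerity/bunkerweb | src/api/app/auth/biscuit.py | _resolve_instances
-- ===== SOURCE A (Python) =====
-- from typing import Optional
--
-- PERM_VERB_BY_METHOD = {
--     "GET": "read",
--     "OPTIONS": "read",
--     "POST": "create",
--     "PUT": "update",
--     "PATCH": "update",
--     "DELETE": "delete",
-- }
--
-- def _resolve_instances(path_normalized: str, method_u: str) -> tuple[Optional[str], Optional[str]]:
--     """Resolve instances endpoints to fine-grained permissions.
--
--     Supported endpoints:
--     - GET    /instances/health | /instances/ping -> instances_read
--     - POST   /instances/reload | legacy /reload  -> instances_execute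
--     - POST   /instances/stop   | legacy /stop    -> instances_execute
--     Fallback: instances_<verb> based on method.
--     """
--     rtype = "instances"
--     p = path_normalized
--     parts = [seg for seg in p.split("/") if seg]
--     # Read actions
--     if method_u in {"GET", "OPTIONS"}:
--         if p in {"/instances/health", "/instances/ping"}:
--             return rtype, "instances_read"
--         # Support per-instance ping: /instances/{hostname}/ping
--         if len(parts) == 3 and parts[0] == "instances" and parts[2] == "ping":
--             return rtype, "instances_read"
--     # Execute actions
--     if method_u == "POST":
--         if p in {"/instances/reload", "/reload", "/instances/stop", "/stop"}:
--             return rtype, "instances_execute"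
--         # Support per-instance reload/stop: /instances/{hostname}/reload|stop
--         if len(parts) == 3 and parts[0] == "instances" and parts[2] in {"reload", "stop"}:
--             return rtype, "instances_execute"
--     verb = PERM_VERB_BY_METHOD.get(method_u)
--     if verb:
--         return rtype, f"instances_{verb}"
--     return rtype, None
-- ===== SOURCE B (Python) =====
-- from typing import Optional
--
-- PERM_VERB_BY_METHOD = {
--     "GET": "read",
--     "OPTIONS": "read",
--     "POST": "create",
--     "PUT": "update",
--     "PATCH": "update",
--     "DELETE": "delete",
-- }
--
-- # Static routing table: (method, canonical path) -> permission.
-- _ROUTES = {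
--     ("GET", "/instances/health"): "instances_read",
--     ("GET", "/instances/ping"): "instances_read",
--     ("GET", "/instances/*/ping"): "instances_read",
--     ("OPTIONS", "/instances/health"): "instances_read",
--     ("OPTIONS", "/instances/ping"): "instances_read",
--     ("OPTIONS", "/instances/*/ping"): "instances_read",
--     ("POST", "/instances/reload"): "instances_execute",
--     ("POST", "/reload"): "instances_execute",
--     ("POST", "/instances/stop"): "instances_execute",
--     ("POST", "/stop"): "instances_execute",
--     ("POST", "/instances/*/reload"): "instances_execute",
--     ("POST", "/instances/*/stop"): "instances_execute",
-- }
--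
-- def _resolve_instances(path_normalized: str, method_u: str) -> tuple[Optional[str], Optional[str]]:
--     parts = [seg for seg in path_normalized.split("/") if seg]
--     if len(parts) == 3 and parts[0] == "instances":
--         canonical = "/instances/*/" + parts[2]
--     else:
--         canonical = path_normalized
--     perm = _ROUTES.get((method_u, canonical))
--     if perm is not None:
--         return "instances", perm
--     verb = PERM_VERB_BY_METHOD.get(method_u)
--     return "instances", f"instances_{verb}" if verb else None
-- ===== Notes on version B (the rewrite author's own statement) =====
-- stated objective: alternative
-- what changed: Replaces A's chain of method/path conditionals by a data-driven static routing table keyed on (method, canonical path), where per-instance paths are first canonicalized to '/instances/*/<action>'; the verb fallback is kept.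
import Mathlib
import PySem

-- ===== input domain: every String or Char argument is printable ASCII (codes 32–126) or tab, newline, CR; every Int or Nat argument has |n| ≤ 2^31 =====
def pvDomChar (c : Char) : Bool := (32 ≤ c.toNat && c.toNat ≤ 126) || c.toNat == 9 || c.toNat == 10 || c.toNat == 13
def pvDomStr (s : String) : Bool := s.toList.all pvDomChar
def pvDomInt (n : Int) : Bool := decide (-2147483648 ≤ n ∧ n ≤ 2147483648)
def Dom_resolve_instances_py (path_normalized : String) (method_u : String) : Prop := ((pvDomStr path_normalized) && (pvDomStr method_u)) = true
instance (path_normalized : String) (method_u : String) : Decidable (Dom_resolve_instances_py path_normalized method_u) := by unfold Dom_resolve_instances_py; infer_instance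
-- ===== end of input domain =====

-- B replaces A's chain of method/path conditionals by a static routing table keyed on
-- (method, canonical path); objective: simpler decomposition (same cost, no speed claim).

-- shared module-level constant PERM_VERB_BY_METHOD (identical in both Python files)
def pvPermVerbByMethod : PySem.Dict String String := PySem.Dict.ofList
  [("GET", "read"), ("OPTIONS", "read"), ("POST", "create"),
   ("PUT", "update"), ("PATCH", "update"), ("DELETE", "delete")]

-- parts = [seg for seg in p.split("/") if seg]  (identical line in both Python files)
def pvParts (p : String) : List String :=
  ((PySem.Str.split? p "/").getD []).filter (fun seg => seg ≠ "")

-- ===== PORT A =====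
def resolve_instances_py (path_normalized : String) (method_u : String) : Option String × Option String :=
  if (method_u = "GET" ∨ method_u = "OPTIONS") ∧
      (path_normalized = "/instances/health" ∨ path_normalized = "/instances/ping") then
    (some "instances", some "instances_read")
  else if (method_u = "GET" ∨ method_u = "OPTIONS") ∧
      ((pvParts path_normalized).length = 3 ∧ (pvParts path_normalized).getD 0 "" = "instances" ∧
        (pvParts path_normalized).getD 2 "" = "ping") then
    (some "instances", some "instances_read")
  else if method_u = "POST" ∧
      (path_normalized = "/instances/reload" ∨ path_normalized = "/reload" ∨
        path_normalized = "/instances/stop" ∨ path_normalized = "/stop") then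
    (some "instances", some "instances_execute")
  else if method_u = "POST" ∧
      ((pvParts path_normalized).length = 3 ∧ (pvParts path_normalized).getD 0 "" = "instances" ∧
        ((pvParts path_normalized).getD 2 "" = "reload" ∨ (pvParts path_normalized).getD 2 "" = "stop")) then
    (some "instances", some "instances_execute")
  else
    match PySem.Dict.get? pvPermVerbByMethod method_u with
    | some verb => if verb = "" then (some "instances", none) else (some "instances", some ("instances_" ++ verb))
    | none => (some "instances", none)

-- ===== PORT B =====
def pvRoutes : PySem.Dict (String × String) String := PySem.Dict.ofList
  [(("GET", "/instances/health"), "instances_read"),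
   (("GET", "/instances/ping"), "instances_read"),
   (("GET", "/instances/*/ping"), "instances_read"),
   (("OPTIONS", "/instances/health"), "instances_read"),
   (("OPTIONS", "/instances/ping"), "instances_read"),
   (("OPTIONS", "/instances/*/ping"), "instances_read"),
   (("POST", "/instances/reload"), "instances_execute"),
   (("POST", "/reload"), "instances_execute"),
   (("POST", "/instances/stop"), "instances_execute"),
   (("POST", "/stop"), "instances_execute"),
   (("POST", "/instances/*/reload"), "instances_execute"),
   (("POST", "/instances/*/stop"), "instances_execute")]

-- canonical = "/instances/*/" + parts[2] if the path is /instances/{hostname}/{action}, else the raw path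
def pvCanonical (p : String) : String :=
  if (pvParts p).length = 3 ∧ (pvParts p).getD 0 "" = "instances" then
    "/instances/*/" ++ (pvParts p).getD 2 ""
  else p

def resolve_instances_py_alt (path_normalized : String) (method_u : String) : Option String × Option String :=
  match PySem.Dict.get? pvRoutes (method_u, pvCanonical path_normalized) with
  | some perm => (some "instances", some perm)
  | none =>
    match PySem.Dict.get? pvPermVerbByMethod method_u with
    | some verb => if verb = "" then (some "instances", none) else (some "instances", some ("instances_" ++ verb))
    | none => (some "instances", none)

-- ===== PRECONDITION & SPEC =====
def Spec_resolve_instances_py (path_normalized : String) (method_u : String) (out : Option String × Option String) : Prop := out = resolve_instances_py_alt path_normalized method_u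
instance (path_normalized : String) (method_u : String) (out : Option String × Option String) : Decidable (Spec_resolve_instances_py path_normalized method_u out) := by unfold Spec_resolve_instances_py; infer_instance

-- ===== CLAIM (what is proved, stated in full; the proofs are below) =====
def Claim_equal_resolve_instances_py : Prop := ∀ (path_normalized : String) (method_u : String), Dom_resolve_instances_py path_normalized method_u → Spec_resolve_instances_py path_normalized method_u (resolve_instances_py path_normalized method_u)

-- ===== LEMMAS AND PROOFS =====

theorem pvBeqPair {α β : Type} [BEq α] [BEq β] (a c : α) (b d : β) :
    ((a, b) == (c, d)) = (a == c && b == d) := rfl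

theorem pvRoutes_mk : pvRoutes = PySem.Dict.mk
  [(("GET", "/instances/health"), "instances_read"),
   (("GET", "/instances/ping"), "instances_read"),
   (("GET", "/instances/*/ping"), "instances_read"),
   (("OPTIONS", "/instances/health"), "instances_read"),
   (("OPTIONS", "/instances/ping"), "instances_read"),
   (("OPTIONS", "/instances/*/ping"), "instances_read"),
   (("POST", "/instances/reload"), "instances_execute"),
   (("POST", "/reload"), "instances_execute"),
   (("POST", "/instances/stop"), "instances_execute"),
   (("POST", "/stop"), "instances_execute"),
   (("POST", "/instances/*/reload"), "instances_execute"),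
   (("POST", "/instances/*/stop"), "instances_execute")] := rfl

theorem pvRoutes_get_GET (c : String) : PySem.Dict.get? pvRoutes ("GET", c) =
    (if c = "/instances/health" ∨ c = "/instances/ping" ∨ c = "/instances/*/ping"
     then some "instances_read" else none) := by
  rw [pvRoutes_mk]
  simp only [PySem.Dict.get?_mk_cons, pvBeqPair]
  rcases eq_or_ne c "/instances/health" with h1 | h1 <;>
  rcases eq_or_ne c "/instances/ping" with h2 | h2 <;>
  rcases eq_or_ne c "/instances/*/ping" with h3 | h3 <;>
    simp_all [PySem.Dict.get?]
  simp [Ne.symm h1, Ne.symm h2, Ne.symm h3]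

theorem pvRoutes_get_OPTIONS (c : String) : PySem.Dict.get? pvRoutes ("OPTIONS", c) =
    (if c = "/instances/health" ∨ c = "/instances/ping" ∨ c = "/instances/*/ping"
     then some "instances_read" else none) := by
  rw [pvRoutes_mk]
  simp only [PySem.Dict.get?_mk_cons, pvBeqPair]
  rcases eq_or_ne c "/instances/health" with h1 | h1 <;>
  rcases eq_or_ne c "/instances/ping" with h2 | h2 <;>
  rcases eq_or_ne c "/instances/*/ping" with h3 | h3 <;>
    simp_all [PySem.Dict.get?]
  simp [Ne.symm h1, Ne.symm h2, Ne.symm h3]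

theorem pvRoutes_get_POST (c : String) : PySem.Dict.get? pvRoutes ("POST", c) =
    (if c = "/instances/reload" ∨ c = "/reload" ∨ c = "/instances/stop" ∨ c = "/stop" ∨
        c = "/instances/*/reload" ∨ c = "/instances/*/stop"
     then some "instances_execute" else none) := by
  rw [pvRoutes_mk]
  simp only [PySem.Dict.get?_mk_cons, pvBeqPair]
  rcases eq_or_ne c "/instances/reload" with h1 | h1 <;>
  rcases eq_or_ne c "/reload" with h2 | h2 <;>
  rcases eq_or_ne c "/instances/stop" with h3 | h3 <;>
  rcases eq_or_ne c "/stop" with h4 | h4 <;>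
  rcases eq_or_ne c "/instances/*/reload" with h5 | h5 <;>
  rcases eq_or_ne c "/instances/*/stop" with h6 | h6 <;>
    simp_all [PySem.Dict.get?]
  simp [Ne.symm h1, Ne.symm h2, Ne.symm h3, Ne.symm h4, Ne.symm h5, Ne.symm h6]

theorem pvRoutes_get_other (m c : String) (h1 : "GET" ≠ m) (h2 : "OPTIONS" ≠ m) (h3 : "POST" ≠ m) :
    PySem.Dict.get? pvRoutes (m, c) = none := by
  rw [pvRoutes_mk]
  simp_all [pvBeqPair, PySem.Dict.get?]

-- "/instances/*/" ++ x never equals any of the six literal endpoint paths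
theorem pvWild_ne (lit : String) (x : String)
    (hl : lit = "/instances/health" ∨ lit = "/instances/ping" ∨ lit = "/instances/reload" ∨
          lit = "/reload" ∨ lit = "/instances/stop" ∨ lit = "/stop") :
    ¬ ("/instances/*/" ++ x = lit) := by
  intro h
  rcases hl with rfl | rfl | rfl | rfl | rfl | rfl <;>
    · have := congrArg String.toList h
      simp [String.toList_append] at this

theorem pvWild_reload (x : String) :
    ("/instances/*/" ++ x = "/instances/*/reload") ↔ x = "reload" := by
  rw [show ("/instances/*/reload" : String) = "/instances/*/" ++ "reload" from rfl]
  exact String.append_right_inj _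

theorem pvWild_stop (x : String) :
    ("/instances/*/" ++ x = "/instances/*/stop") ↔ x = "stop" := by
  rw [show ("/instances/*/stop" : String) = "/instances/*/" ++ "stop" from rfl]
  exact String.append_right_inj _

theorem pv_case_GET (p : String) :
    resolve_instances_py p "GET" = (some "instances", some "instances_read") := by
  unfold resolve_instances_py
  split_ifs <;> first | decide | simp_all

theorem pv_case_OPTIONS (p : String) :
    resolve_instances_py p "OPTIONS" = (some "instances", some "instances_read") := by
  unfold resolve_instances_py
  split_ifs <;> first | decide | simp_all

theorem pv_alt_GET (p : String) :
    resolve_instances_py_alt p "GET" = (some "instances", some "instances_read") := by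
  unfold resolve_instances_py_alt
  rw [pvRoutes_get_GET]
  split_ifs <;> decide

theorem pv_alt_OPTIONS (p : String) :
    resolve_instances_py_alt p "OPTIONS" = (some "instances", some "instances_read") := by
  unfold resolve_instances_py_alt
  rw [pvRoutes_get_OPTIONS]
  split_ifs <;> decide

theorem pv_case_POST (p : String) :
    resolve_instances_py p "POST" = resolve_instances_py_alt p "POST" := by
  unfold resolve_instances_py resolve_instances_py_alt
  rw [pvRoutes_get_POST]
  by_cases h3 : (pvParts p).length = 3 ∧ (pvParts p).getD 0 "" = "instances"
  · have hA1 : ¬ (p = "/instances/reload" ∨ p = "/reload" ∨ p = "/instances/stop" ∨ p = "/stop") := by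
      rintro (rfl | rfl | rfl | rfl) <;> revert h3 <;> decide
    have hc : pvCanonical p = "/instances/*/" ++ (pvParts p).getD 2 "" := by
      unfold pvCanonical; rw [if_pos h3]
    rw [hc]
    have hw1 := pvWild_ne "/instances/reload" ((pvParts p).getD 2 "") (Or.inr (Or.inr (Or.inl rfl)))
    have hw2 := pvWild_ne "/reload" ((pvParts p).getD 2 "") (Or.inr (Or.inr (Or.inr (Or.inl rfl))))
    have hw3 := pvWild_ne "/instances/stop" ((pvParts p).getD 2 "") (Or.inr (Or.inr (Or.inr (Or.inr (Or.inl rfl)))))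
    have hw4 := pvWild_ne "/stop" ((pvParts p).getD 2 "") (Or.inr (Or.inr (Or.inr (Or.inr (Or.inr rfl)))))
    simp only [pvWild_reload, pvWild_stop, hw1, hw2, hw3, hw4, hA1, h3, true_and, false_or, if_false]
    split_ifs <;> first | rfl | decide | simp_all
  · have hc : pvCanonical p = p := by unfold pvCanonical; rw [if_neg h3]
    rw [hc]
    have hw1 : ¬ (p = "/instances/*/reload") := by rintro rfl; exact h3 (by decide)
    have hw2 : ¬ (p = "/instances/*/stop") := by rintro rfl; exact h3 (by decide)
    have hA2 : ¬ ((pvParts p).length = 3 ∧ (pvParts p).getD 0 "" = "instances" ∧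
        (pvParts p).getD 2 "" = "ping") := fun h => h3 ⟨h.1, h.2.1⟩
    have hA4 : ¬ ((pvParts p).length = 3 ∧ (pvParts p).getD 0 "" = "instances" ∧
        ((pvParts p).getD 2 "" = "reload" ∨ (pvParts p).getD 2 "" = "stop")) := fun h => h3 ⟨h.1, h.2.1⟩
    simp only [hw1, hw2, hA2, hA4, and_false, or_false, if_false]
    split_ifs <;> first | rfl | decide | simp_all

theorem pv_case_other (p m : String) (h1 : "GET" ≠ m) (h2 : "OPTIONS" ≠ m) (h3 : "POST" ≠ m) :
    resolve_instances_py p m = resolve_instances_py_alt p m := by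
  unfold resolve_instances_py resolve_instances_py_alt
  rw [pvRoutes_get_other m _ h1 h2 h3]
  simp [Ne.symm h1, Ne.symm h2, Ne.symm h3]

-- ===== VERDICT (by name: the statement is the Claim_ definition above) =====
theorem resolve_instances_py_spec : Claim_equal_resolve_instances_py := by
  intro p m _
  unfold Spec_resolve_instances_py
  rcases eq_or_ne "GET" m with rfl | h1
  · rw [pv_case_GET, pv_alt_GET]
  rcases eq_or_ne "OPTIONS" m with rfl | h2
  · rw [pv_case_OPTIONS, pv_alt_OPTIONS]
  rcases eq_or_ne "POST" m with rfl | h3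
  · exact pv_case_POST p
  exact pv_case_other p m h1 h2 h3
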